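-- pv_equiv track=rewrite | github.com/mblukac/psysafe-ai | cleanup_system/modules/documentation.py | _is_well_formatted
-- ===== SOURCE A (Python) =====
-- def _is_well_formatted(docstring: str) -> bool:
--     """Check if a docstring is well-formatted."""
--     # Basic checks for formatting
--     lines = docstring.strip().split('\n')
--
--     # Check for proper sections
--     sections = ['Args:', 'Returns:', 'Raises:', 'Example:']
--     for section in sections:
--         if section in docstring:
--             # Check if section has proper spacing
--             idx = next((i for i, line in enumerate(lines) if section in line), -1)
--             if idx > 0 and lines[idx - 1].strip():
--                 return False
--
--     return True
-- ===== SOURCE B (Python) =====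
-- def _is_well_formatted(docstring: str) -> bool:
--     """Check if a docstring is well-formatted."""
--     pending = [s for s in ('Args:', 'Returns:', 'Raises:', 'Example:') if s in docstring]
--     prev_nonblank = False
--     for line in docstring.strip().split('\n'):
--         hits = [s for s in pending if s in line]
--         if hits and prev_nonblank:
--             return False
--         pending = [s for s in pending if s not in hits]
--         prev_nonblank = bool(line.strip())
--     return True
-- ===== Notes on version B (the rewrite author's own statement) =====
-- stated objective: alternative
-- what changed: B replaces A's per-section scans (next() over enumerate(lines) plus a lines[idx-1] lookup for each of the four markers) with a single streaming pass over the lines that carries a previous-line-nonblank flag and a shrinking list of still-unseen sections, returning False as soon as a pending section first appears on a line preceded by a nonblank line.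
import Mathlib
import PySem

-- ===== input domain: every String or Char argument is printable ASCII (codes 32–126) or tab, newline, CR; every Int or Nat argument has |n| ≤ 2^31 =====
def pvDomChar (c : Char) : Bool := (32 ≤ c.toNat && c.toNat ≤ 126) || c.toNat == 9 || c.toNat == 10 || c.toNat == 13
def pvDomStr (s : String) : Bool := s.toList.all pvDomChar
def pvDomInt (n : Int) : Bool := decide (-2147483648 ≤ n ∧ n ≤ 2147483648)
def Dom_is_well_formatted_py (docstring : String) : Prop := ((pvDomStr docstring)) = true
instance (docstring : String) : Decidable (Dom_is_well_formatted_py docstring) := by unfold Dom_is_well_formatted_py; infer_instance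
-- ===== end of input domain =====

-- B replaces A's per-section index scans (next() + lines[idx-1]) by one streaming pass over the
-- lines with a shrinking pending-section list and a previous-line-nonblank flag; same result.

-- ===== PORT A =====
-- next((i for i, line in enumerate(lines) if section in line), -1)
def pyFirstIdx (sec : String) : List String → Int → Int
  | [], _ => -1
  | l :: ls, i => if PySem.Str.isIn sec l then i else pyFirstIdx sec ls (i + 1)

-- the 'for section in sections' loop with its early 'return False'
def loopA (docstring : String) (lines : List String) : List String → Bool
  | [] => true
  | sec :: rest =>
      if PySem.Str.isIn sec docstring then
        let idx : Int := pyFirstIdx sec lines 0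
        if decide (idx > 0) && (match PySem.List.pyGet? lines (idx - 1) with
            | some prev => decide (PySem.Str.strip prev ≠ "")
            | none => false)   -- IndexError branch; unreachable since idx is then a valid index
        then false
        else loopA docstring lines rest
      else loopA docstring lines rest

def is_well_formatted_py (docstring : String) : Bool :=
  let lines := (PySem.Str.split? (PySem.Str.strip docstring) "\n").getD []   -- sep "\n" ≠ "", so split? is some
  loopA docstring lines ["Args:", "Returns:", "Raises:", "Example:"]

-- ===== PORT B =====
-- the 'for line in lines' loop: state = (pending sections, previous line nonblank), early 'return False'
def loopB : List String → List String → Bool → Bool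
  | [], _, _ => true
  | line :: rest, pending, prevNonblank =>
      let hits := pending.filter (fun s => PySem.Str.isIn s line)
      if !hits.isEmpty && prevNonblank then false
      else loopB rest (pending.filter (fun s => !hits.contains s)) (PySem.Str.strip line ≠ "")

def is_well_formatted_py_alt (docstring : String) : Bool :=
  let pending := ["Args:", "Returns:", "Raises:", "Example:"].filter
    (fun s => PySem.Str.isIn s docstring)
  let lines := (PySem.Str.split? (PySem.Str.strip docstring) "\n").getD []   -- sep "\n" ≠ "", so split? is some
  loopB lines pending false

-- ===== PRECONDITION & SPEC =====
def Spec_is_well_formatted_py (docstring : String) (out : Bool) : Prop := out = is_well_formatted_py_alt docstring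
instance (docstring : String) (out : Bool) : Decidable (Spec_is_well_formatted_py docstring out) := by unfold Spec_is_well_formatted_py; infer_instance

-- ===== CLAIM (what is proved, stated in full; the proofs are below) =====
def Claim_equal_is_well_formatted_py : Prop := ∀ (docstring : String), Dom_is_well_formatted_py docstring → Spec_is_well_formatted_py docstring (is_well_formatted_py docstring)

-- ===== LEMMAS AND PROOFS =====

-- A's per-section test, named: 'idx > 0 and lines[idx-1].strip()'
def badA (lines : List String) (sec : String) : Bool :=
  let idx : Int := pyFirstIdx sec lines 0
  decide (idx > 0) && (match PySem.List.pyGet? lines (idx - 1) with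
    | some prev => decide (PySem.Str.strip prev ≠ "")
    | none => false)

-- B's per-section semantics: the first line containing sec is preceded by a nonblank line
-- (the flag 'prev' standing for the line before the current suffix)
def badB (sec : String) : List String → Bool → Bool
  | [], _ => false
  | l :: ls, prev => if PySem.Str.isIn sec l then prev else badB sec ls (PySem.Str.strip l ≠ "")

lemma allCongrMem {α : Type} (l : List α) (p q : α → Bool) (h : ∀ a ∈ l, p a = q a) :
    l.all p = l.all q := by
  induction l with
  | nil => rfl
  | cons x xs ih => simp [h x (by simp), ih (fun a ha => h a (by simp [ha]))]

lemma loopA_cons (doc : String) (lines : List String) (sec : String) (rest : List String) :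
    loopA doc lines (sec :: rest)
      = if PySem.Str.isIn sec doc then
          (if badA lines sec then false else loopA doc lines rest)
        else loopA doc lines rest := rfl

lemma loopA_eq_all (doc : String) (lines : List String) (S : List String) :
    loopA doc lines S = S.all (fun sec => !(PySem.Str.isIn sec doc && badA lines sec)) := by
  induction S with
  | nil => rfl
  | cons sec rest ih =>
      rw [loopA_cons, List.all_cons, ih]
      cases hd : PySem.Str.isIn sec doc <;> cases hb : badA lines sec <;>
        simp

lemma loopB_eq_all (lines pending : List String) (prev : Bool) :
    loopB lines pending prev = pending.all (fun sec => !badB sec lines prev) := by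
  induction lines generalizing pending prev with
  | nil => simp [loopB, badB]
  | cons l ls ih =>
      simp only [loopB]
      by_cases hc : (!(pending.filter (fun s => PySem.Str.isIn s l)).isEmpty && prev) = true
      · rw [if_pos hc]
        obtain ⟨h1, h2⟩ := Bool.and_eq_true_iff.mp hc
        rw [Bool.not_eq_eq_eq_not, Bool.not_true] at h1
        obtain ⟨s, hs⟩ := List.isEmpty_eq_false_iff_exists_mem.mp h1
        obtain ⟨hsp, hsl⟩ := List.mem_filter.mp hs
        have hsl' : PySem.Str.isIn s l = true := by simpa using hsl
        symm
        rw [List.all_eq_false]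
        refine ⟨s, hsp, ?_⟩
        have : badB s (l :: ls) prev = true := by
          simp only [badB]
          rw [if_pos hsl', h2]
        simp [this]
      · rw [if_neg hc, ih, List.all_filter]
        have hkey : ∀ s ∈ pending, PySem.Str.isIn s l = true → prev = false := by
          intro s hsp hsl
          cases hp : prev
          · rfl
          · exfalso
            apply hc
            rw [Bool.and_eq_true, hp]
            refine ⟨?_, rfl⟩
            rw [Bool.not_eq_eq_eq_not, Bool.not_true, List.isEmpty_eq_false_iff_exists_mem]
            exact ⟨s, List.mem_filter.mpr ⟨hsp, by simpa using hsl⟩⟩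
        apply allCongrMem
        intro a ha
        by_cases hl : PySem.Str.isIn a l = true
        · have hmem : a ∈ pending.filter (fun s => PySem.Str.isIn s l) :=
            List.mem_filter.mpr ⟨ha, by simpa using hl⟩
          have hp : prev = false := hkey a ha hl
          have hbad : badB a (l :: ls) prev = false := by
            simp only [badB]
            rw [if_pos hl, hp]
          rw [hbad]
          simp
          exact Or.inl ⟨ha, by simpa using hl⟩
        · have hnm : a ∉ pending.filter (fun s => PySem.Str.isIn s l) := by
            intro hm
            exact hl (by simpa using (List.mem_filter.mp hm).2)
          have hbad : badB a (l :: ls) prev = badB a ls (PySem.Str.strip l ≠ "") := by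
            simp only [badB]
            rw [if_neg hl]
          simp [hbad]
          intro _ h2
          exact absurd (by simpa using h2) hl

-- pyFirstIdx only returns -1 or an index ≥ its accumulator
lemma pyFirstIdx_lb (sec : String) (ls : List String) (i : Int) :
    pyFirstIdx sec ls i = -1 ∨ i ≤ pyFirstIdx sec ls i := by
  induction ls generalizing i with
  | nil => left; rfl
  | cons l ls ih =>
      simp only [pyFirstIdx]
      split_ifs with h
      · right; omega
      · rcases ih (i + 1) with h' | h'
        · left; exact h'
        · right; omega

-- shift of the accumulator
lemma pyFirstIdx_shift (sec : String) (ls : List String) (i : Int) (hi : 0 ≤ i) :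
    pyFirstIdx sec ls (i + 1)
      = (if pyFirstIdx sec ls i = -1 then -1 else pyFirstIdx sec ls i + 1) := by
  induction ls generalizing i with
  | nil => simp [pyFirstIdx]
  | cons l ls ih =>
      by_cases h : PySem.Str.isIn sec l = true
      · simp only [pyFirstIdx]
        rw [if_pos h, if_pos h, if_neg (by omega)]
      · simp only [pyFirstIdx]
        rw [if_neg h, if_neg h, ih (i + 1) (by omega)]

-- the bridge: B's streaming test, with the flag generalized, in terms of A's first-index test
lemma badB_eq (sec : String) (lines : List String) (prev : Bool) :
    badB sec lines prev = (if pyFirstIdx sec lines 0 = 0 then prev else badA lines sec) := by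
  induction lines generalizing prev with
  | nil =>
      simp only [badB, badA, pyFirstIdx]
      rw [if_neg (by decide)]
      simp
  | cons l ls ih =>
      by_cases hl : PySem.Str.isIn sec l = true
      · have h1 : badB sec (l :: ls) prev = prev := by
          simp only [badB]; rw [if_pos hl]
        have h2 : pyFirstIdx sec (l :: ls) 0 = 0 := by
          simp only [pyFirstIdx]; rw [if_pos hl]
        rw [h1, h2, if_pos rfl]
      · have hidx : pyFirstIdx sec (l :: ls) 0 = pyFirstIdx sec ls 1 := by
          simp only [pyFirstIdx]; rw [if_neg hl]; norm_num
        have hB : badB sec (l :: ls) prev = badB sec ls (PySem.Str.strip l ≠ "") := by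
          simp only [badB]; rw [if_neg hl]
        rw [hB, ih]
        have e01 : (0 : Int) + 1 = 1 := by decide
        rcases pyFirstIdx_lb sec ls 0 with hj | hj
        · -- sec occurs in no later line: both sides are false
          have hs : pyFirstIdx sec ls 1 = -1 := by
            have h := pyFirstIdx_shift sec ls 0 le_rfl
            rw [if_pos hj, e01] at h
            exact h
          have ha1 : badA ls sec = false := by simp [badA, hj]
          have ha2 : badA (l :: ls) sec = false := by simp [badA, hidx, hs]
          rw [if_neg (by simp [hj]), if_neg (by rw [hidx, hs]; decide), ha1, ha2]
        · -- sec first occurs in ls at index j ≥ 0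
          have hshift : pyFirstIdx sec ls 1 = pyFirstIdx sec ls 0 + 1 := by
            have h := pyFirstIdx_shift sec ls 0 le_rfl
            rw [if_neg (by omega), e01] at h
            exact h
          have hc2 : pyFirstIdx sec (l :: ls) 0 = pyFirstIdx sec ls 0 + 1 := by
            rw [hidx, hshift]
          by_cases h0 : pyFirstIdx sec ls 0 = 0
          · -- first occurrence is the very first later line: previous line is l
            rw [if_pos h0, hc2, h0, if_neg (by decide)]
            simp only [badA, hc2, h0]
            simp
          · -- first occurrence deeper in ls: both read ls[j-1]
            rw [if_neg h0, hc2, if_neg (by omega)]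
            obtain ⟨n, hn⟩ : ∃ n : Nat, pyFirstIdx sec ls 0 = (n : Int) :=
              ⟨(pyFirstIdx sec ls 0).toNat, (Int.toNat_of_nonneg hj).symm⟩
            obtain ⟨m, hm⟩ : ∃ m : Nat, n = m + 1 := ⟨n - 1, by omega⟩
            have hget : PySem.List.pyGet? (l :: ls) (pyFirstIdx sec (l :: ls) 0 - 1)
                = PySem.List.pyGet? ls (pyFirstIdx sec ls 0 - 1) := by
              have e1 : pyFirstIdx sec (l :: ls) 0 - 1 = ((m + 1 : Nat) : Int) := by
                rw [hc2]; omega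
              have e2 : pyFirstIdx sec ls 0 - 1 = ((m : Nat) : Int) := by omega
              rw [e1, e2, PySem.List.pyGet?_natCast, PySem.List.pyGet?_natCast]
              simp
            have d1 : decide (pyFirstIdx sec (l :: ls) 0 > 0) = true := by
              rw [hc2]; simp; omega
            have d2 : decide (pyFirstIdx sec ls 0 > 0) = true := by
              simp; omega
            simp only [badA, hget, d1, d2]

lemma badA_eq_badB_false (sec : String) (lines : List String) :
    badA lines sec = badB sec lines false := by
  rw [badB_eq]
  split_ifs with h
  · simp [badA, h]
  · rfl

-- ===== VERDICT (by name: the statement is the Claim_ definition above) =====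
theorem is_well_formatted_py_spec : Claim_equal_is_well_formatted_py := by
  intro docstring _
  unfold Spec_is_well_formatted_py is_well_formatted_py is_well_formatted_py_alt
  rw [loopA_eq_all, loopB_eq_all, List.all_filter]
  apply allCongrMem
  intro a _
  rw [badA_eq_badB_false, Bool.not_and]
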